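-- pv_equiv track=rewrite | github.com/daniel-reich/ubiquitous-fiesta | XQwPPHE6ZSu4Er9ht_23.py | is_economical
-- ===== SOURCE A (Python) =====
-- def is_economical(n):
--  l = len(str(n))
--  i = 2
--  p = count = 0
--  while p or n > 1:
--    if n % i:
--       count += len(str(i)) * (p > 0) + len(str(p)) * (p > 1)
--       i += 1
--       p = 0
--    else:
--       n //= i
--       p += 1
--  if count < l: return 'Frugal'
--  if count > l: return 'Wasteful'
--  return 'Equidigital'
-- ===== SOURCE B (Python) =====
-- def is_economical(n):
--     l = len(str(n))
--     count = 0
--     m = n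
--     d = 2
--     while d * d <= m:
--         if m % d == 0:
--             e = 0
--             while m % d == 0:
--                 m //= d
--                 e += 1
--             count += len(str(d)) + (len(str(e)) if e > 1 else 0)
--         d += 1
--     if m > 1:
--         count += len(str(m))
--     if count < l:
--         return 'Frugal'
--     if count > l:
--         return 'Wasteful'
--     return 'Equidigital'
-- ===== Notes on version B (the rewrite author's own statement) =====
-- stated objective: faster
-- what changed: B trial-divides only up to sqrt(n), pulling out each prime's full exponent in an inner loop and counting the leftover cofactor (>1) as a final prime, instead of A's one-divisor-at-a-time scan that walks i all the way up to the largest prime factor.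
import Mathlib
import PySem

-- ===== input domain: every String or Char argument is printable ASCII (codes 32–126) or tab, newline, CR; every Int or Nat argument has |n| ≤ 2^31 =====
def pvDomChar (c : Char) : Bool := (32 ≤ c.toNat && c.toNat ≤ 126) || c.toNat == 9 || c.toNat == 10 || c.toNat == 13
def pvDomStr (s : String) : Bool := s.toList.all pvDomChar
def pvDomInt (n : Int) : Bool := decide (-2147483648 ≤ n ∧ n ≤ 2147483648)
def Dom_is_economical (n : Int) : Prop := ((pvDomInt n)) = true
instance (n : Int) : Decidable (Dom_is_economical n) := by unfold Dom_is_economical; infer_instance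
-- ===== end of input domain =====

-- B replaces A's one-divisor-at-a-time scan (which walks i up to the largest prime factor)
-- by trial division only up to sqrt(n), pulling out each prime's full exponent at once and
-- counting the leftover cofactor (> 1) as a final prime factor; equivalence on all inputs.


-- len(str(k))
def pvStrLen (k : Int) : Int := PySem.Str.len (PySem.Int.toStr k)

-- ===== PORT A =====
-- A's while loop, step for step: state (n, i, p, count). The while loop has no structural
-- argument, so it takes fuel; fuel 2*n.toNat+4 is proven sufficient for every n, so the
-- `none` (exhaustion) branch is unreachable.
def aLoop : Nat → Int → Int → Int → Int → Option Int
  | 0, _, _, _, _ => none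
  | f+1, n, i, p, count =>
    if p ≠ 0 ∨ 1 < n then
      if PySem.Int.mod n i ≠ 0 then
        aLoop f n (i+1) 0
          (count + pvStrLen i * (if 0 < p then 1 else 0) + pvStrLen p * (if 1 < p then 1 else 0))
      else
        aLoop f (PySem.Int.floordiv n i) i (p+1) count
    else some count

def is_economical (n : Int) : String :=
  let l := pvStrLen n
  let count := (aLoop (2 * n.toNat + 4) n 2 0 0).getD 0
  if count < l then "Frugal" else if l < count then "Wasteful" else "Equidigital"

-- ===== PORT B =====
-- Source B's inner `while m % d == 0` loop: returns (m after all divisions, exponent e);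
-- fuel m.toNat+1 is sufficient for every m ≥ 1, d ≥ 2 reached from the outer loop.
def bDiv : Nat → Int → Int → Int × Int
  | 0, m, _ => (m, 0)
  | f+1, m, d =>
    if PySem.Int.mod m d = 0 then
      let r := bDiv f (PySem.Int.floordiv m d) d
      (r.1, r.2 + 1)
    else (m, 0)

-- Source B's outer `while d * d <= m` loop: state (m, d, count), returns (m, count).
def bLoop : Nat → Int → Int → Int → Int × Int
  | 0, m, _, count => (m, count)
  | f+1, m, d, count =>
    if d * d ≤ m then
      if PySem.Int.mod m d = 0 then
        let r := bDiv (m.toNat + 1) m d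
        bLoop f r.1 (d+1) (count + pvStrLen d + (if 1 < r.2 then pvStrLen r.2 else 0))
      else bLoop f m (d+1) count
    else (m, count)

def is_economical_alt (n : Int) : String :=
  let l := pvStrLen n
  let r := bLoop (n.toNat + 4) n 2 0
  let count := if 1 < r.1 then r.2 + pvStrLen r.1 else r.2
  if count < l then "Frugal" else if l < count then "Wasteful" else "Equidigital"

-- ===== PRECONDITION & SPEC =====
def Spec_is_economical (n : Int) (out : String) : Prop := out = is_economical_alt n
instance (n : Int) (out : String) : Decidable (Spec_is_economical n out) := by
  unfold Spec_is_economical; infer_instance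

-- ===== CLAIM (what is proved, stated in full; the proofs are below) =====
def Claim_equal_is_economical : Prop :=
  ∀ (n : Int), Dom_is_economical n → Spec_is_economical n (is_economical n)

-- ===== LEMMAS AND PROOFS =====

theorem aLoop_step (f : Nat) (n i p c : Int) :
    aLoop (f+1) n i p c =
      if p ≠ 0 ∨ 1 < n then
        if PySem.Int.mod n i ≠ 0 then
          aLoop f n (i+1) 0
            (c + pvStrLen i * (if 0 < p then 1 else 0) + pvStrLen p * (if 1 < p then 1 else 0))
        else aLoop f (PySem.Int.floordiv n i) i (p+1) c
      else some c := rfl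

theorem bDiv_spec : ∀ (f : Nat) (m d : Int), 1 ≤ m → 2 ≤ d → m.toNat < f →
    1 ≤ (bDiv f m d).1 ∧ (bDiv f m d).1 ∣ m ∧ ¬ (d ∣ (bDiv f m d).1) ∧ 0 ≤ (bDiv f m d).2 ∧
    ((bDiv f m d).2 = 0 → (bDiv f m d).1 = m) ∧
    (1 ≤ (bDiv f m d).2 → d * (bDiv f m d).1 ≤ m ∧ (bDiv f m d).2 + (bDiv f m d).1 ≤ m) := by
  intro f
  induction f with
  | zero => intro m d h1 h2 h3; omega
  | succ f IH =>
    intro m d h1 h2 h3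
    by_cases hdvd : d ∣ m
    · have hmod : PySem.Int.mod m d = 0 := by
        rw [PySem.Int.mod_eq_emod_of_pos (by omega)]
        exact Int.emod_eq_zero_of_dvd hdvd
      have hfd : PySem.Int.floordiv m d = m / d := PySem.Int.floordiv_eq_ediv_of_pos (by omega)
      have hq : d * (m / d) = m := Int.mul_ediv_cancel' hdvd
      have hq0 : (0:Int) < m / d := by nlinarith
      have hqm : m / d < m := by nlinarith
      have e : bDiv (f+1) m d = ((bDiv f (m/d) d).1, (bDiv f (m/d) d).2 + 1) := by
        simp [bDiv, hmod, hfd]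
      have hlt : (m/d).toNat < f := by omega
      obtain ⟨i1, i2, i3, i4, i5, i6⟩ := IH (m/d) d (by omega) h2 hlt
      have hqd : m / d ∣ m := ⟨d, by rw [mul_comm]; exact hq.symm⟩
      rw [e]; dsimp only
      refine ⟨i1, dvd_trans i2 hqd, i3, by omega, fun h => absurd h (by omega), fun _ => ?_⟩
      by_cases hz : (bDiv f (m/d) d).2 = 0
      · have h15 := i5 hz
        constructor
        · rw [h15]; omega
        · rw [hz, h15]; nlinarith
      · obtain ⟨j1, j2⟩ := i6 (by omega)
        exact ⟨by omega, by omega⟩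
    · have hmod : ¬ PySem.Int.mod m d = 0 := by
        rw [PySem.Int.mod_eq_emod_of_pos (by omega)]
        intro h; exact hdvd (Int.dvd_of_emod_eq_zero h)
      have e : bDiv (f+1) m d = (m, 0) := by simp [bDiv, hmod]
      rw [e]
      exact ⟨h1, dvd_refl m, hdvd, by norm_num, fun _ => rfl, by norm_num⟩

theorem aRun : ∀ (f : Nat) (m d p c : Int) (fa : Nat), 1 ≤ m → 2 ≤ d → m.toNat < f →
    (bDiv f m d).2.toNat < fa → (p ≠ 0 ∨ 1 < m) → 0 ≤ p →
    aLoop fa m d p c = aLoop (fa - (bDiv f m d).2.toNat) (bDiv f m d).1 d (p + (bDiv f m d).2) c := by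
  intro f
  induction f with
  | zero => intro m d p c fa h1 h2 h3; omega
  | succ f IH =>
    intro m d p c fa h1 h2 h3 hfa hcond hp
    by_cases hdvd : d ∣ m
    · have hmod : PySem.Int.mod m d = 0 := by
        rw [PySem.Int.mod_eq_emod_of_pos (by omega)]
        exact Int.emod_eq_zero_of_dvd hdvd
      have hfd : PySem.Int.floordiv m d = m / d := PySem.Int.floordiv_eq_ediv_of_pos (by omega)
      have hq : d * (m / d) = m := Int.mul_ediv_cancel' hdvd
      have hq0 : (0:Int) < m / d := by nlinarith
      have hqm : m / d < m := by nlinarith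
      have e : bDiv (f+1) m d = ((bDiv f (m/d) d).1, (bDiv f (m/d) d).2 + 1) := by
        simp [bDiv, hmod, hfd]
      have hi4 : 0 ≤ (bDiv f (m/d) d).2 := (bDiv_spec f (m/d) d (by omega) h2 (by omega)).2.2.2.1
      obtain ⟨fa', rfl⟩ : ∃ k, fa = k + 1 := ⟨fa - 1, by omega⟩
      have stepA : aLoop (fa'+1) m d p c = aLoop fa' (m/d) d (p+1) c := by
        simp only [aLoop, hfd]
        rw [if_pos hcond, if_neg (by simp [hmod])]
      rw [stepA, e]; dsimp only
      have := IH (m/d) d (p+1) c fa' (by omega) h2 (by omega) (by rw [e] at hfa; dsimp only at hfa; omega)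
        (Or.inl (by omega)) (by omega)
      rw [this]
      congr 1
      · omega
      · ring
    · have hmod : ¬ PySem.Int.mod m d = 0 := by
        rw [PySem.Int.mod_eq_emod_of_pos (by omega)]
        intro h; exact hdvd (Int.dvd_of_emod_eq_zero h)
      have e : bDiv (f+1) m d = (m, 0) := by simp [bDiv, hmod]
      rw [e]; dsimp only
      simp only [Int.toNat_zero, Nat.sub_zero, add_zero]

theorem aTail : ∀ (k : Nat) (n i c : Int) (fa : Nat), 2 ≤ n → 2 ≤ i → i ≤ n →
    (n - i).toNat ≤ k → (∀ j : Int, i ≤ j → j < n → ¬ j ∣ n) → (n - i).toNat + 3 ≤ fa →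
    aLoop fa n i 0 c = some (c + pvStrLen n) := by
  intro k
  induction k with
  | zero =>
    intro n i c fa h2n h2i hin hk hnd hfa
    have hin' : n = i := by omega
    subst hin'
    obtain ⟨f1, rfl⟩ : ∃ k, fa = k + 3 := ⟨fa - 3, by omega⟩
    have hmod : PySem.Int.mod n n = 0 := by
      rw [PySem.Int.mod_eq_emod_of_pos (by omega)]; simp
    have hdd : PySem.Int.floordiv n n = 1 := by
      rw [PySem.Int.floordiv_eq_ediv_of_pos (by omega)]
      exact Int.ediv_self (by omega)
    have hmod1 : PySem.Int.mod 1 n = 1 := by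
      rw [PySem.Int.mod_eq_emod_of_pos (by omega)]
      exact Int.emod_eq_of_lt (by omega) (by omega)
    show aLoop (f1+1+1+1) n n 0 c = _
    rw [aLoop_step, if_pos (Or.inr (by omega)), if_neg (by simp [hmod]), hdd,
        aLoop_step, if_pos (Or.inl (by omega)), if_pos (by rw [hmod1]; omega),
        aLoop_step, if_neg (by omega)]
    norm_num
  | succ k IH =>
    intro n i c fa h2n h2i hin hk hnd hfa
    by_cases hin' : i = n
    · subst hin'
      exact IH i i c fa h2n h2i le_rfl (by omega) hnd hfa
    · have hilt : i < n := by omega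
      have hndvd : ¬ i ∣ n := hnd i le_rfl hilt
      have hmod : ¬ PySem.Int.mod n i = 0 := by
        rw [PySem.Int.mod_eq_emod_of_pos (by omega)]
        intro h; exact hndvd (Int.dvd_of_emod_eq_zero h)
      obtain ⟨fa', rfl⟩ : ∃ j, fa = j + 1 := ⟨fa - 1, by omega⟩
      have step : aLoop (fa'+1) n i 0 c = aLoop fa' n (i+1) 0 c := by
        rw [aLoop_step, if_pos (Or.inr (by omega)), if_pos (by simpa using hmod)]
        norm_num
      rw [step]
      exact IH n (i+1) c fa' h2n (by omega) (by omega) (by omega)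
        (fun j hj1 hj2 => hnd j (by omega) hj2) (by omega)

theorem bLoop_step (f : Nat) (m d c : Int) :
    bLoop (f+1) m d c =
      if d * d ≤ m then
        if PySem.Int.mod m d = 0 then
          bLoop f (bDiv (m.toNat + 1) m d).1 (d+1)
            (c + pvStrLen d + (if 1 < (bDiv (m.toNat + 1) m d).2 then pvStrLen (bDiv (m.toNat + 1) m d).2 else 0))
        else bLoop f m (d+1) c
      else (m, c) := rfl

def pvWrap (r : Int × Int) : Int := if 1 < r.1 then r.2 + pvStrLen r.1 else r.2

theorem mainLoop : ∀ (μ : Nat) (n i c : Int) (fa fb : Nat), 2 ≤ n → 2 ≤ i →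
    (∀ j : Int, 2 ≤ j → j < i → ¬ j ∣ n) →
    n.toNat + (n - i).toNat ≤ μ →
    n.toNat + (n - i).toNat + 3 ≤ fa → (n - i).toNat + 2 ≤ fb →
    aLoop fa n i 0 c = some (pvWrap (bLoop fb n i c)) := by
  intro μ
  induction μ using Nat.strong_induction_on with
  | _ μ IH =>
    intro n i c fa fb h2n h2i hsmall hμ hfa hfb
    obtain ⟨fb', rfl⟩ : ∃ k, fb = k + 1 := ⟨fb - 1, by omega⟩
    by_cases hii : i * i ≤ n
    · have hiltn : i < n := by nlinarith
      by_cases hdvd : i ∣ n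
      · -- divide case
        have hmod : PySem.Int.mod n i = 0 := by
          rw [PySem.Int.mod_eq_emod_of_pos (by omega)]
          exact Int.emod_eq_zero_of_dvd hdvd
        have hspec := bDiv_spec (n.toNat + 1) n i (by omega) h2i (by omega)
        set m' := (bDiv (n.toNat + 1) n i).1 with hm'
        set e := (bDiv (n.toNat + 1) n i).2 with he
        obtain ⟨i1, i2, i3, i4, i5, i6⟩ := hspec
        have e1 : 1 ≤ e := by
          by_contra h
          exact i3 (i5 (by omega) ▸ hdvd)
        obtain ⟨j1, j2⟩ := i6 e1
        have hm2 : 2 * m' ≤ n := by nlinarith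
        -- A: run the e divisions, then the flush step
        have hrun := aRun (n.toNat + 1) n i 0 c fa (by omega) h2i (by omega) (by omega)
          (Or.inr (by omega)) le_rfl
        rw [← hm', ← he] at hrun
        rw [hrun, zero_add]
        have hmodm : PySem.Int.mod m' i ≠ 0 := by
          rw [PySem.Int.mod_eq_emod_of_pos (by omega)]
          intro h; exact i3 (Int.dvd_of_emod_eq_zero h)
        obtain ⟨g, hg⟩ : ∃ g, fa - e.toNat = g + 1 := ⟨fa - e.toNat - 1, by omega⟩
        rw [hg, aLoop_step, if_pos (Or.inl (by omega)), if_pos hmodm]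
        have hcount : c + pvStrLen i * (if 0 < e then 1 else 0) + pvStrLen e * (if 1 < e then 1 else 0)
            = c + pvStrLen i + (if 1 < e then pvStrLen e else 0) := by
          rw [if_pos (by omega : (0:Int) < e)]
          split_ifs <;> ring
        rw [hcount]
        -- B: one outer step
        rw [bLoop_step, if_pos hii, if_pos hmod, ← hm', ← he]
        set c' := c + pvStrLen i + (if 1 < e then pvStrLen e else 0)
        by_cases hm1 : m' = 1
        · rw [hm1]
          obtain ⟨g', rfl⟩ : ∃ k, g = k + 1 := ⟨g - 1, by omega⟩
          rw [aLoop_step, if_neg (by omega)]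
          obtain ⟨fb'', rfl⟩ : ∃ k, fb' = k + 1 := ⟨fb' - 1, by omega⟩
          rw [bLoop_step, if_neg (by nlinarith)]
          simp [pvWrap]
        · have hm'2 : 2 ≤ m' := by omega
          have hsmall' : ∀ j : Int, 2 ≤ j → j < i + 1 → ¬ j ∣ m' := by
            intro j hj1 hj2 hdj
            by_cases hji : j = i
            · exact i3 (hji ▸ hdj)
            · exact hsmall j hj1 (by omega) (dvd_trans hdj i2)
          exact IH (m'.toNat + (m' - (i+1)).toNat) (by omega) m' (i+1) c' g fb'
            hm'2 (by omega) hsmall' le_rfl (by omega) (by omega)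
      · -- non-divide case
        have hmod : ¬ PySem.Int.mod n i = 0 := by
          rw [PySem.Int.mod_eq_emod_of_pos (by omega)]
          intro h; exact hdvd (Int.dvd_of_emod_eq_zero h)
        obtain ⟨fa', rfl⟩ : ∃ k, fa = k + 1 := ⟨fa - 1, by omega⟩
        rw [aLoop_step, if_pos (Or.inr (by omega)), if_pos (by simpa using hmod)]
        rw [bLoop_step, if_pos hii, if_neg hmod]
        have hc : c + pvStrLen i * (if (0:Int) < 0 then 1 else 0) + pvStrLen 0 * (if (1:Int) < 0 then 1 else 0) = c := by
          norm_num
        rw [hc]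
        refine IH (n.toNat + (n - (i+1)).toNat) (by omega) n (i+1) c fa' fb'
          h2n (by omega) ?_ le_rfl (by omega) (by omega)
        intro j hj1 hj2 hdj
        by_cases hji : j = i
        · exact hdvd (hji ▸ hdj)
        · exact hsmall j hj1 (by omega) hdj
    · -- i*i > n : n is prime relative to [2, i); B exits, A scans the tail
      have hin : i ≤ n := by
        by_contra h
        exact hsmall n h2n (by omega) (dvd_refl n)
      have hprime : ∀ j : Int, i ≤ j → j < n → ¬ j ∣ n := by
        intro j hj1 hj2 hdj
        have hj2' : 2 ≤ j := by omega
        have hq : j * (n / j) = n := Int.mul_ediv_cancel' hdj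
        have hq2 : 2 ≤ n / j := by
          rcases (by nlinarith : (1:Int) ≤ n / j).lt_or_eq with h | h
          · omega
          · exfalso; rw [← h] at hq; omega
        have hqd : n / j ∣ n := ⟨j, by rw [mul_comm]; exact hq.symm⟩
        have hqi : i ≤ n / j := by
          by_contra h
          exact hsmall (n / j) hq2 (by omega) hqd
        nlinarith
      rw [aTail (n - i).toNat n i c fa h2n h2i hin le_rfl hprime (by omega)]
      rw [bLoop_step, if_neg hii]
      simp [pvWrap, if_pos (by omega : (1:Int) < n)]

-- ===== VERDICT (by name: the statement is the Claim_ definition above) =====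
theorem is_economical_spec : Claim_equal_is_economical := by
  unfold Claim_equal_is_economical Spec_is_economical
  intro n hdom
  simp only [is_economical, is_economical_alt]
  by_cases h2 : 2 ≤ n
  · have hmain := mainLoop (n.toNat + (n - 2).toNat) n 2 0 (2 * n.toNat + 4) (n.toNat + 4)
      h2 le_rfl (fun j hj1 hj2 => absurd hj2 (by omega)) le_rfl (by omega) (by omega)
    rw [hmain]
    simp only [Option.getD_some, pvWrap]
    rfl
  · have hn1 : n ≤ 1 := by omega
    have ha : aLoop (2 * n.toNat + 4) n 2 0 0 = some 0 := by
      obtain ⟨g, hg⟩ : ∃ g, 2 * n.toNat + 4 = g + 1 := ⟨2 * n.toNat + 3, by omega⟩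
      rw [hg, aLoop_step]
      exact if_neg (by omega)
    have hb : bLoop (n.toNat + 4) n 2 0 = (n, 0) := by
      obtain ⟨h, hh⟩ : ∃ h, n.toNat + 4 = h + 1 := ⟨n.toNat + 3, by omega⟩
      rw [hh, bLoop_step]
      exact if_neg (by omega)
    rw [ha, hb]
    simp only [Option.getD_some]
    norm_num [show ¬ (1:Int) < n by omega]
    rfl
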